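-- pv_equiv track=rewrite | github.com/rrwick/Are-reads-required | scripts/drop_invariant_sites_and_count_diffs.py | drop_invariant_sites
-- ===== SOURCE A (Python) =====
-- def drop_invariant_sites(seqs):
--     seq_len = len(seqs[0])
--     new_seqs = [[] for _ in seqs]
--     for i in range(seq_len):
--         if all(s[i] == seqs[0][i] for s in seqs):  # all seqs are identical at position i
--             continue
--         for seq, new_seq in zip(seqs, new_seqs):
--             new_seq.append(seq[i])
--     return [''.join(s) for s in new_seqs]
-- ===== SOURCE B (Python) =====
-- def drop_invariant_sites(seqs):
--     first = seqs[0]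
--     variant = [False] * len(first)
--     for s in seqs:
--         for i in range(len(first)):
--             if s[i] != first[i]:
--                 variant[i] = True
--     return [''.join(c for c, v in zip(s, variant) if v) for s in seqs]
-- ===== Notes on version B (the rewrite author's own statement) =====
-- stated objective: alternative
-- what changed: Instead of A's column-major scan that conditionally appends each variant column to per-sequence accumulators, B makes a row-major pass accumulating a single boolean variant mask (marking positions where a sequence differs from the first), then rebuilds each output by filtering the sequence against that mask.
import Mathlib
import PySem

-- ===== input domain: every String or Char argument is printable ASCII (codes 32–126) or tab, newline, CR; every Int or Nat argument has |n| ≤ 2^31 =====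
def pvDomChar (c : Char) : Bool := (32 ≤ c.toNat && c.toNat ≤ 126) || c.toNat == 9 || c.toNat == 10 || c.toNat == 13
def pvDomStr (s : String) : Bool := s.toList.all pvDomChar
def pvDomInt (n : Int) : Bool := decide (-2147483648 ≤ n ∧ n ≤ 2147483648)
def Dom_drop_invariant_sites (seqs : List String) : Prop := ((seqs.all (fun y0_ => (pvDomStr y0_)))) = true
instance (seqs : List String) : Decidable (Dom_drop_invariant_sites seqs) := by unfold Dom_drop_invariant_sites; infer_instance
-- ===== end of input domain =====

-- B replaces A's column-major scan with per-sequence accumulators by a row-major pass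
-- building one boolean variant mask, then filters each sequence against the mask (alternative).


-- ===== PORT A =====
def drop_invariant_sites (seqs : List String) : List String :=
  -- seq_len = len(seqs[0]); seqs[0] via pyGetD (Pre_ guarantees seqs ≠ [])
  let first := (PySem.List.pyGetD seqs 0 "").toList
  let seq_len : Int := first.length
  let init : List (List Char) := seqs.map (fun _ => ([] : List Char))
  let new_seqs := (PySem.List.pyRange 0 seq_len 1).foldl
    (fun new_seqs i =>
      if seqs.all (fun s => PySem.List.pyGetD s.toList i ' ' == PySem.List.pyGetD first i ' ')
      then new_seqs
      else (seqs.zip new_seqs).map (fun p => p.2 ++ [PySem.List.pyGetD p.1.toList i ' ']))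
    init
  new_seqs.map (fun s => String.mk s)

-- ===== PORT B =====
def drop_invariant_sites_alt (seqs : List String) : List String :=
  -- first = seqs[0]; variant = [False]*len(first)
  let first := (PySem.List.pyGetD seqs 0 "").toList
  let variant0 : List Bool := List.replicate first.length false
  -- for s in seqs: for i in range(len(first)): if s[i] != first[i]: variant[i] = True
  let variant := seqs.foldl
    (fun variant s =>
      (PySem.List.pyRange 0 (first.length : Int) 1).foldl
        (fun v i =>
          if PySem.List.pyGetD s.toList i ' ' != PySem.List.pyGetD first i ' '
          then v.set i.toNat true else v)
        variant)
    variant0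
  -- [''.join(c for c, v in zip(s, variant) if v) for s in seqs]
  seqs.map (fun s =>
    String.mk (((s.toList.zip variant).filter (fun p => p.2)).map (fun p => p.1)))

-- ===== PRECONDITION & SPEC =====
-- Pre_ excludes exactly the inputs on which A raises IndexError: empty seqs, or some
-- sequence shorter than seqs[0] (B raises there as well).
def Pre_drop_invariant_sites (seqs : List String) : Prop :=
  seqs ≠ [] ∧ ∀ s ∈ seqs, (seqs.headD "").toList.length ≤ s.toList.length
instance (seqs : List String) : Decidable (Pre_drop_invariant_sites seqs) := by
  unfold Pre_drop_invariant_sites; infer_instance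

def pvWitness_drop_invariant_sites : List String := ["ab", "ac"]

def Spec_drop_invariant_sites (seqs : List String) (out : List String) : Prop :=
  out = drop_invariant_sites_alt seqs
instance (seqs : List String) (out : List String) : Decidable (Spec_drop_invariant_sites seqs out) := by
  unfold Spec_drop_invariant_sites; infer_instance

-- ===== CLAIM (what is proved, stated in full; the proofs are below) =====
def Claim_equal_drop_invariant_sites : Prop := ∀ (seqs : List String),
  Dom_drop_invariant_sites seqs → Pre_drop_invariant_sites seqs →
  Spec_drop_invariant_sites seqs (drop_invariant_sites seqs)

-- ===== LEMMAS AND PROOFS =====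

theorem pv_zip_self (l : List String) (f : String → List Char) (n : Nat) :
    (l.zip (l.map f)).map (fun p => p.2 ++ [p.1.toList.getD n ' '])
      = l.map (fun s => f s ++ [s.toList.getD n ' ']) := by
  induction l with
  | nil => rfl
  | cons a t ih => simp only [List.map_cons, List.zip_cons_cons, ih]

-- A's loop over range(n) builds exactly the variant-index projection of every sequence.
theorem pv_fold_eq (seqs : List String) (first : List Char) (n : Nat) :
    (PySem.List.pyRange 0 (n : Int) 1).foldl
      (fun new_seqs i =>
        if seqs.all (fun s => PySem.List.pyGetD s.toList i ' ' == PySem.List.pyGetD first i ' ')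
        then new_seqs
        else (seqs.zip new_seqs).map (fun p => p.2 ++ [PySem.List.pyGetD p.1.toList i ' ']))
      (seqs.map (fun _ => ([] : List Char)))
    = seqs.map (fun s =>
        (((List.range n).filter
            (fun j => !seqs.all (fun t => t.toList.getD j ' ' == first.getD j ' '))).map
          (fun j => s.toList.getD j ' '))) := by
  induction n with
  | zero => simp [PySem.List.pyRange_one_eq_nil]
  | succ n ih =>
      have hsplit : PySem.List.pyRange 0 ((n : Int) + 1) 1
          = PySem.List.pyRange 0 (n : Int) 1 ++ [(n : Int)] := by
        simpa using PySem.List.pyRange_one_succ_right (a := 0) (b := (n : Int)) (by positivity)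
      push_cast
      rw [hsplit, List.foldl_append, ih]
      simp only [List.foldl_cons, List.foldl_nil, PySem.List.pyGetD_natCast,
        List.range_succ, List.filter_append]
      by_cases hc : (seqs.all fun s => s.toList.getD n ' ' == first.getD n ' ') = true
      · rw [if_pos hc]
        simp only [List.getD_eq_getElem?_getD] at hc
        simp [hc]
      · rw [if_neg hc, pv_zip_self]
        simp only [List.getD_eq_getElem?_getD] at hc
        simp [hc]

-- B's inner loop over range(n): set-updates at the marked positions, characterised pointwise.
theorem pv_inner_fold (first : List Char) (s : String) (n : Nat) (v : List Bool) :
    (PySem.List.pyRange 0 (n : Int) 1).foldl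
      (fun v i =>
        if PySem.List.pyGetD s.toList i ' ' != PySem.List.pyGetD first i ' '
        then v.set i.toNat true else v) v
    = (List.range v.length).map (fun j =>
        v.getD j false || (decide (j < n) && !(s.toList.getD j ' ' == first.getD j ' '))) := by
  induction n with
  | zero =>
      simp only [Nat.cast_zero]
      refine (List.ext_getElem (by simp) ?_).symm
      intro j h1 h2
      simp [List.getD_eq_getElem?_getD, List.getElem?_eq_getElem (by simpa using h2)]
  | succ n ih =>
      have hsplit : PySem.List.pyRange 0 ((n : Int) + 1) 1
          = PySem.List.pyRange 0 (n : Int) 1 ++ [(n : Int)] := by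
        simpa using PySem.List.pyRange_one_succ_right (a := 0) (b := (n : Int)) (by positivity)
      push_cast
      rw [hsplit, List.foldl_append, ih]
      simp only [List.foldl_cons, List.foldl_nil, PySem.List.pyGetD_natCast, Int.toNat_natCast]
      by_cases hc : (s.toList.getD n ' ' == first.getD n ' ') = true
      · rw [if_neg (by simp only [bne, hc, Bool.not_true]; exact Bool.false_ne_true)]
        refine List.ext_getElem (by simp) (fun j h1 h2 => ?_)
        simp only [List.getElem_map, List.getElem_range]
        by_cases hjn : j = n
        · subst hjn
          have hceq := eq_of_beq hc
          simp only [List.getD_eq_getElem?_getD] at hceq ⊢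
          simp [hceq]
        · rw [decide_eq_decide.mpr (show (j < n) ↔ (j < n + 1) by omega)]
      · rw [Bool.not_eq_true] at hc
        rw [if_pos (by simp only [bne, hc, Bool.not_false])]
        refine List.ext_getElem (by simp) (fun j h1 h2 => ?_)
        simp only [List.length_map, List.length_range] at h2
        by_cases hjn : j = n
        · subst hjn
          rw [List.getElem_set_self (by simpa using h2)]
          simp only [List.getD_eq_getElem?_getD] at hc ⊢
          simp [beq_eq_false_iff_ne.mp hc]
        · rw [List.getElem_set_ne (by omega)]
          simp only [List.getElem_map, List.getElem_range]
          rw [decide_eq_decide.mpr (show (j < n) ↔ (j < n + 1) by omega)]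

-- B's outer loop over seqs: the final mask records, per position, whether any sequence differs.
theorem pv_outer_fold (first : List Char) (seqs : List String) (n : Nat) (v : List Bool)
    (hv : v.length = n) :
    seqs.foldl
      (fun variant s =>
        (PySem.List.pyRange 0 (n : Int) 1).foldl
          (fun v i =>
            if PySem.List.pyGetD s.toList i ' ' != PySem.List.pyGetD first i ' '
            then v.set i.toNat true else v) variant) v
    = (List.range n).map (fun j =>
        v.getD j false || !(seqs.all (fun t => t.toList.getD j ' ' == first.getD j ' '))) := by
  induction seqs generalizing v with
  | nil =>
      subst hv
      simp only [List.foldl_nil, List.all_nil, Bool.not_true, Bool.or_false]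
      refine List.ext_getElem (by simp) ?_
      intro j h1 h2
      simp [List.getD_eq_getElem?_getD, List.getElem?_eq_getElem (by simpa using h1)]
  | cons s rest ih =>
      simp only [List.foldl_cons]
      rw [pv_inner_fold first s n v, hv,
        ih ((List.range n).map _) (by simp)]
      refine List.ext_getElem (by simp) ?_
      intro j h1 h2
      simp only [List.length_map, List.length_range] at h1
      simp only [List.getElem_map, List.getElem_range,
        PySem.List.getD_map_range _ n j false h1, List.all_cons, Bool.not_and]
      simp [h1, Bool.or_assoc]

-- filtering a sequence against a mask given as a map over range n = projecting the kept indices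
theorem pv_zip_mask (s : List Char) (p : Nat → Bool) (n : Nat) (hn : n ≤ s.length) :
    ((s.zip ((List.range n).map p)).filter (fun q => q.2)).map (fun q => q.1)
      = ((List.range n).filter p).map (fun j => s.getD j ' ') := by
  have hzip : s.zip ((List.range n).map p)
      = (List.range n).map (fun j => (s.getD j ' ', p j)) := by
    refine List.ext_getElem (by simp; omega) ?_
    intro j h1 h2
    have hjn : j < n := by simpa using h2
    rw [List.getElem_zip]
    simp [List.getD_eq_getElem?_getD, List.getElem?_eq_getElem (by omega : j < s.length)]
  rw [hzip, List.filter_map, List.map_map]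
  have : (List.range n).filter ((fun (q : Char × Bool) => q.2) ∘ (fun j => (s.getD j ' ', p j)))
      = (List.range n).filter p := List.filter_congr (fun j _ => rfl)
  rw [this]
  rfl

-- ===== VERDICT (by name: the statement is the Claim_ definition above) =====
theorem drop_invariant_sites_spec : Claim_equal_drop_invariant_sites := by
  intro seqs _ hpre
  obtain ⟨hne, hlen⟩ := hpre
  obtain ⟨s0, rest, rfl⟩ : ∃ s0 rest, seqs = s0 :: rest := by
    cases seqs with
    | nil => exact absurd rfl hne
    | cons a l => exact ⟨a, l, rfl⟩
  unfold Spec_drop_invariant_sites drop_invariant_sites drop_invariant_sites_alt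
  simp only [PySem.List.pyGetD_zero_cons]
  rw [pv_fold_eq (s0 :: rest) s0.toList s0.toList.length]
  rw [pv_outer_fold s0.toList (s0 :: rest) s0.toList.length _ (by simp)]
  have hmask : (List.range s0.toList.length).map (fun j =>
        (List.replicate s0.toList.length false).getD j false ||
        !((s0 :: rest).all (fun t => t.toList.getD j ' ' == s0.toList.getD j ' ')))
      = (List.range s0.toList.length).map (fun j =>
        !((s0 :: rest).all (fun t => t.toList.getD j ' ' == s0.toList.getD j ' '))) := by
    refine List.map_congr_left ?_
    intro j hj
    have hj' : j < s0.length := by simpa using hj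
    simp [List.getD_eq_getElem?_getD, hj']
  rw [hmask, List.map_map]
  refine List.map_congr_left ?_
  intro s hs
  have hsn : s0.toList.length ≤ s.toList.length := by
    simpa using hlen s hs
  simp only [Function.comp]
  exact congrArg String.mk (pv_zip_mask s.toList _ s0.toList.length hsn).symm
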